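-- pv_equiv track=rewrite | github.com/cellularmitosis/leopard.sh | leopardsh/utils/txt-fix.py | fix_pkgspec
-- ===== SOURCE A (Python) =====
-- def fix_pkgspec(lines):
--     has_pkgspec = False
--     for line in lines:
--         if 'pkgspec=$package-$version$ppc64' in line:
--             has_pkgspec = True
--             break
--     if has_pkgspec:
--         return lines
--     start_index = None
--     for (i, line) in enumerate(lines):
--         if line == 'LEOPARDSH_MIRROR=${LEOPARDSH_MIRROR:-https://ssl.pepas.com/leopardsh}':
--             start_index = i
--     if start_index is None:
--         raise Exception("lolwut?")
--     lines2 = lines[:start_index+1] \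
--         + [
--             '',
--             '''if test -n "$(echo -n $0 | grep '\.ppc64\.sh$')" ; then''',
--             '    ppc64=".ppc64"',
--             'fi',
--             '',
--             'pkgspec=$package-$version$ppc64'
--         ] \
--         + lines[start_index+1:]
--     return lines2
-- ===== SOURCE B (Python) =====
-- PKG = 'pkgspec=$package-$version$ppc64'
-- MIRROR = 'LEOPARDSH_MIRROR=${LEOPARDSH_MIRROR:-https://ssl.pepas.com/leopardsh}'
-- BLOCK = [
--     '',
--     '''if test -n "$(echo -n $0 | grep '\.ppc64\.sh$')" ; then''',
--     '    ppc64=".ppc64"',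
--     'fi',
--     '',
--     PKG,
-- ]
--
-- def fix_pkgspec(lines):
--     if any(PKG in line for line in lines):
--         return lines
--     # build the result back-to-front: walk the lines in reverse, and in front of
--     # the FIRST mirror line met (i.e. after the LAST one in original order)
--     # emit the block reversed; no indices, no slicing.
--     out = []
--     inserted = False
--     for line in reversed(lines):
--         if not inserted and line == MIRROR:
--             out.extend(reversed(BLOCK))
--             inserted = True
--         out.append(line)
--     if not inserted:
--         raise Exception("lolwut?")
--     out.reverse()
--     return out
-- ===== Notes on version B (the rewrite author's own statement) =====
-- stated objective: alternative
-- what changed: Instead of A's enumerate scan for the LAST mirror index followed by slice-and-concatenate splicing, B builds the result back-to-front: a single reversed traversal with an 'inserted' flag emits the reversed block right when the first mirror line is met from the end, then reverses the accumulator; no indices or slices are used.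
import Mathlib
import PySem

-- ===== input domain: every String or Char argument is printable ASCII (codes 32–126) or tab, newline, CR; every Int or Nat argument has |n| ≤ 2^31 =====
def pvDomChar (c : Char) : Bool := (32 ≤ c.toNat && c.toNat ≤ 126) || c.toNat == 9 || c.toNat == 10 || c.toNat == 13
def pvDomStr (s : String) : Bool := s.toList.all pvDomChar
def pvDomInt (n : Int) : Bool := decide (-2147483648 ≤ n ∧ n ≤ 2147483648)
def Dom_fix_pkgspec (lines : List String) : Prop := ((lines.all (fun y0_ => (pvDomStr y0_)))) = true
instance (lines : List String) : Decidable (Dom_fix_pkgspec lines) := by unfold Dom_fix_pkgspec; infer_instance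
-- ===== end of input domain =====

-- B replaces A's last-index scan + slice splice by an index-free back-to-front construction
-- over the reversed list (alternative decomposition, same cost); both raise Exception("lolwut?")
-- when no pkgspec line and no mirror line exists (excluded by Pre_).

def pkgspecStr : String := "pkgspec=$package-$version$ppc64"
def mirrorStr : String := "LEOPARDSH_MIRROR=${LEOPARDSH_MIRROR:-https://ssl.pepas.com/leopardsh}"
def insertBlock : List String :=
  [ "",
    "if test -n \"$(echo -n $0 | grep '\\.ppc64\\.sh$')\" ; then",
    "    ppc64=\".ppc64\"",
    "fi",
    "",
    "pkgspec=$package-$version$ppc64" ]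

-- ===== PORT A =====
-- first loop of A: scan with early break
def aHasLoop : List String → Bool
  | [] => false
  | l :: ls => if PySem.Str.isIn pkgspecStr l then true else aHasLoop ls

def fix_pkgspec (lines : List String) : List String :=
  let has_pkgspec := aHasLoop lines
  if has_pkgspec then lines
  else
    let start_index : Option Int :=
      (PySem.List.enumerate lines 0).foldl
        (fun acc p => if p.2 == mirrorStr then some p.1 else acc) none
    match start_index with
    | none => lines  -- Python raises Exception("lolwut?") here; excluded by Pre_
    | some i =>
        PySem.List.slice lines none (some (i + 1)) ++ insertBlock ++
          PySem.List.slice lines (some (i + 1)) none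

-- ===== PORT B =====
-- B's loop over reversed(lines): accumulator out (in append order) and the inserted flag
def bLoop : List String → List String → Bool → (List String × Bool)
  | [], out, ins => (out, ins)
  | l :: ls, out, ins =>
      if !ins && l == mirrorStr then bLoop ls ((out ++ insertBlock.reverse) ++ [l]) true
      else bLoop ls (out ++ [l]) ins

def fix_pkgspec_alt (lines : List String) : List String :=
  if lines.any (fun l => PySem.Str.isIn pkgspecStr l) then lines
  else
    let st := bLoop lines.reverse [] false
    if !st.2 then lines  -- Python raises Exception("lolwut?") here; excluded by Pre_
    else st.1.reverse

-- ===== PRECONDITION & SPEC =====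
-- Pre_ excludes exactly the inputs where A (and B) raise Exception("lolwut?"):
-- no line contains the pkgspec marker and no line equals the mirror line.
def Pre_fix_pkgspec (lines : List String) : Prop :=
  lines.any (fun l => PySem.Str.isIn pkgspecStr l) = true ∨ mirrorStr ∈ lines
instance (lines : List String) : Decidable (Pre_fix_pkgspec lines) := by
  unfold Pre_fix_pkgspec; infer_instance

def pvWitness_fix_pkgspec : List String :=
  ["LEOPARDSH_MIRROR=${LEOPARDSH_MIRROR:-https://ssl.pepas.com/leopardsh}"]

def Spec_fix_pkgspec (lines : List String) (out : List String) : Prop := out = fix_pkgspec_alt lines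
instance (lines : List String) (out : List String) : Decidable (Spec_fix_pkgspec lines out) := by
  unfold Spec_fix_pkgspec; infer_instance

-- ===== CLAIM (what is proved, stated in full; the proofs are below) =====
def Claim_equal_fix_pkgspec : Prop := ∀ (lines : List String), Dom_fix_pkgspec lines → Pre_fix_pkgspec lines → Spec_fix_pkgspec lines (fix_pkgspec lines)

-- ===== LEMMAS AND PROOFS =====

-- A's early-break loop computes List.any
theorem aHasLoop_eq_any (lines : List String) :
    aHasLoop lines = lines.any (fun l => PySem.Str.isIn pkgspecStr l) := by
  induction lines with
  | nil => rfl
  | cons l ls ih =>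
      simp only [aHasLoop, List.any_cons, ih]
      cases PySem.Str.isIn pkgspecStr l <;> simp

-- once inserted, B's loop just copies the rest
theorem bLoop_true (r out : List String) : bLoop r out true = (out ++ r, true) := by
  induction r generalizing out with
  | nil => simp [bLoop]
  | cons l ls ih => simp [bLoop, ih]

-- the accumulator factors out of B's loop
theorem bLoop_out (r out : List String) (ins : Bool) :
    bLoop r out ins = (out ++ (bLoop r [] ins).1, (bLoop r [] ins).2) := by
  induction r generalizing out ins with
  | nil => simp [bLoop]
  | cons l ls ih =>
      by_cases h : (!ins && l == mirrorStr) = true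
      · rw [bLoop, if_pos h, bLoop, if_pos h, ih, ih (([] ++ insertBlock.reverse) ++ [l])]
        simp
      · rw [bLoop, if_neg h, bLoop, if_neg h, ih, ih ([] ++ [l])]
        simp

-- A's last-index fold, one snoc step at a time
theorem foldA_snoc (ys : List String) (y : String) (s : Int) (o : Option Int) :
    (PySem.List.enumerate (ys ++ [y]) s).foldl
      (fun acc p => if p.2 == mirrorStr then some p.1 else acc) o
    = if y == mirrorStr then some (s + ys.length)
      else (PySem.List.enumerate ys s).foldl
        (fun acc p => if p.2 == mirrorStr then some p.1 else acc) o := by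
  rw [PySem.List.enumerate_append]
  simp [PySem.List.enumerate_cons, PySem.List.enumerate_nil]

-- core correspondence: A's last-mirror-index fold vs B's reversed back-to-front loop
theorem core_lemma (lines : List String) :
    ((PySem.List.enumerate lines 0).foldl
        (fun acc p => if p.2 == mirrorStr then some p.1 else acc) none = none →
      bLoop lines.reverse [] false = (lines.reverse, false)) ∧
    (∀ i : Int, (PySem.List.enumerate lines 0).foldl
        (fun acc p => if p.2 == mirrorStr then some p.1 else acc) none = some i →
      0 ≤ i ∧ i.toNat + 1 ≤ lines.length ∧
      bLoop lines.reverse [] false =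
        ((lines.drop (i.toNat + 1)).reverse ++ insertBlock.reverse ++
          (lines.take (i.toNat + 1)).reverse, true)) := by
  induction lines using List.reverseRecOn with
  | nil => exact ⟨fun _ => rfl, fun i h => by simp [PySem.List.enumerate_nil] at h⟩
  | append_singleton ys y ih =>
      rw [foldA_snoc]
      by_cases hy : (y == mirrorStr) = true
      · refine ⟨fun h => by simp [hy] at h, fun i h => ?_⟩
        rw [if_pos hy] at h
        have hi : i = (ys.length : Int) := by
          simpa using h.symm
        subst hi
        refine ⟨by positivity, by simp, ?_⟩
        have hyv : y = mirrorStr := by simpa using hy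
        rw [List.reverse_append]
        simp only [List.reverse_singleton, List.singleton_append]
        rw [bLoop, if_pos (by simp [hyv]), bLoop_true]
        have h1 : (Int.toNat ↑ys.length) + 1 = ys.length + 1 := by simp
        rw [h1]
        rw [List.take_of_length_le (by simp)]
        simp [hyv]
      · refine ⟨fun h => ?_, fun i h => ?_⟩
        · rw [if_neg hy] at h
          rw [List.reverse_append]
          simp only [List.reverse_singleton, List.singleton_append]
          rw [bLoop, if_neg (by simp [hy]), bLoop_out, (ih.1 h)]
          simp
        · rw [if_neg hy] at h
          obtain ⟨h0, hlen, hb⟩ := ih.2 i h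
          refine ⟨h0, by simp; omega, ?_⟩
          rw [List.reverse_append]
          simp only [List.reverse_singleton, List.singleton_append]
          rw [bLoop, if_neg (by simp [hy]), bLoop_out, hb]
          rw [List.take_append_of_le_length (by omega), List.drop_append_of_le_length (by omega)]
          simp

-- ===== VERDICT (by name: the statement is the Claim_ definition above) =====
theorem fix_pkgspec_spec : Claim_equal_fix_pkgspec := by
  intro lines _ _
  show fix_pkgspec lines = fix_pkgspec_alt lines
  unfold fix_pkgspec fix_pkgspec_alt
  rw [aHasLoop_eq_any]
  by_cases hb : lines.any (fun l => PySem.Str.isIn pkgspecStr l) = true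
  · rw [if_pos hb, if_pos hb]
  · rw [if_neg hb, if_neg hb]
    obtain ⟨hnone, hsome⟩ := core_lemma lines
    cases h : (PySem.List.enumerate lines 0).foldl
        (fun acc p => if p.2 == mirrorStr then some p.1 else acc) none with
    | none => simp [hnone h]
    | some i =>
        obtain ⟨h0, hlen, hbl⟩ := hsome i h
        dsimp only
        rw [hbl]
        simp only [Bool.not_true, Bool.false_eq_true, if_false, List.reverse_append,
          List.reverse_reverse]
        rw [PySem.List.slice_to lines (by omega : (0:Int) ≤ i + 1),
            PySem.List.slice_from lines (by omega : (0:Int) ≤ i + 1)]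
        have : (i + 1).toNat = i.toNat + 1 := by omega
        rw [this]
        simp [List.append_assoc]
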